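-- pv_equiv track=rewrite | github.com/boostcampaitech7/level4-cv-finalproject-hackathon-cv-14-lv3 | app/webshop_agent/log_extract.py | split_by_reset
-- ===== SOURCE A (Python) =====
-- def split_by_reset(log_list):
--     result = []
--     current_list = []
--
--     for item in log_list:
--         if item == "reset":
--             if current_list:
--                 result.append(current_list)
--             current_list = [item]  # reset이 있으면 새로운 리스트 시작
--         else:
--             current_list.append(item)
--
--     # 마지막 리스트가 비어있지 않으면 추가
--     if current_list:
--         result.append(current_list)
--
--     return result
-- ===== SOURCE B (Python) =====
-- def split_by_reset(log_list):
--     n = len(log_list)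
--     segments = []
--     i = 0
--     while i < n:
--         j = i + 1
--         while j < n and log_list[j] != "reset":
--             j += 1
--         segments.append(log_list[i:j])
--         i = j
--     return segments
-- ===== Notes on version B (the rewrite author's own statement) =====
-- stated objective: alternative
-- what changed: Replaces the stateful accumulator (result/current_list with flush-on-reset) by an index two-pointer scan: each segment boundary j is found by an inner scan for the next 'reset' and the segment is emitted as the slice log_list[i:j].
import Mathlib
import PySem

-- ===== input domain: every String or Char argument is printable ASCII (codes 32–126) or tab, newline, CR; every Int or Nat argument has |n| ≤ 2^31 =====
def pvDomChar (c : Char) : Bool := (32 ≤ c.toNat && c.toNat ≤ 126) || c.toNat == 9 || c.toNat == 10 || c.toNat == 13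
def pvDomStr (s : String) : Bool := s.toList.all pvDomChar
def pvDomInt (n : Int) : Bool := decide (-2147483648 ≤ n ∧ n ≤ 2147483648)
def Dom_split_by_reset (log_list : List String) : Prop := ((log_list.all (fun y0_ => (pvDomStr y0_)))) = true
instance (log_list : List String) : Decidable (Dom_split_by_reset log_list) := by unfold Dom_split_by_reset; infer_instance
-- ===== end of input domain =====

-- B is an alternative, equally fast implementation: an index two-pointer scan emitting slices
-- instead of A's accumulator with flush-on-reset. Return-value equivalence; neither mutates.

-- ===== PORT A =====
-- the for-loop over (result, current_list), transliterated as structural recursion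
def splitA : List String → List (List String) → List String → List (List String)
  | [], res, cur => if cur.isEmpty then res else res ++ [cur]
  | item :: rest, res, cur =>
    if item = "reset" then
      splitA rest (if cur.isEmpty then res else res ++ [cur]) [item]
    else
      splitA rest res (cur ++ [item])

def split_by_reset (log_list : List String) : List (List String) :=
  splitA log_list [] []

-- ===== PORT B =====
-- inner while loop: advance j while j < n and log_list[j] != "reset"
-- (log_list[j] is guarded by j < n, so getD with a dummy default is exact)
def bFind (l : List String) (n j : Nat) : Nat :=
  if h : j < n ∧ l.getD j "" ≠ "reset" then bFind l n (j + 1) else j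
termination_by n - j
decreasing_by omega

theorem bFind_ge (l : List String) (n j : Nat) : j ≤ bFind l n j := by
  fun_induction bFind l n j with
  | case1 j h ih => omega
  | case2 j h => omega

-- outer while loop over i; log_list[i:j] is PySem.List.slice
def bOuter (l : List String) (n i : Nat) : List (List String) :=
  if h : i < n then
    PySem.List.slice l (some (i : Int)) (some ((bFind l n (i + 1) : Nat) : Int))
      :: bOuter l n (bFind l n (i + 1))
  else []
termination_by n - i
decreasing_by have := bFind_ge l n (i + 1); omega

def split_by_reset_alt (log_list : List String) : List (List String) :=
  bOuter log_list log_list.length 0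

-- ===== PRECONDITION & SPEC =====
def Spec_split_by_reset (log_list : List String) (out : List (List String)) : Prop := out = split_by_reset_alt log_list
instance (log_list : List String) (out : List (List String)) : Decidable (Spec_split_by_reset log_list out) := by unfold Spec_split_by_reset; infer_instance

-- ===== CLAIM (what is proved, stated in full; the proofs are below) =====
def Claim_equal_split_by_reset : Prop := ∀ (log_list : List String), Dom_split_by_reset log_list → Spec_split_by_reset log_list (split_by_reset log_list)

-- ===== LEMMAS AND PROOFS =====

-- clean characterisation both ports are reduced to
def chunks : List String → List (List String)
  | [] => []
  | x :: xs =>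
    (x :: xs.takeWhile (fun s => s ≠ "reset")) :: chunks (xs.dropWhile (fun s => s ≠ "reset"))
termination_by l => l.length
decreasing_by
  simp only [List.length_cons]
  exact Nat.lt_succ_of_le (List.length_dropWhile_le _ _)

theorem chunks_nil : chunks [] = [] := by rw [chunks]

theorem chunks_cons (x : String) (xs : List String) :
    chunks (x :: xs) =
      (x :: xs.takeWhile (fun s => s ≠ "reset"))
        :: chunks (xs.dropWhile (fun s => s ≠ "reset")) := by rw [chunks]

theorem splitA_eq (l : List String) :
    ∀ (res : List (List String)) (cur : List String), cur ≠ [] →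
      splitA l res cur =
        res ++ (cur ++ l.takeWhile (fun s => s ≠ "reset"))
          :: chunks (l.dropWhile (fun s => s ≠ "reset")) := by
  induction l with
  | nil =>
    intro res cur hc
    rw [splitA, if_neg (by simp [List.isEmpty_iff, hc])]
    simp [chunks_nil]
  | cons x xs ih =>
    intro res cur hc
    by_cases hx : x = "reset"
    · rw [splitA, if_pos hx, if_neg (by simp [List.isEmpty_iff, hc])]
      rw [ih (res ++ [cur]) [x] (by simp)]
      subst hx
      simp [chunks_cons]
    · rw [splitA, if_neg hx]
      rw [ih res (cur ++ [x]) (by simp)]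
      simp [hx]

theorem split_eq_chunks (l : List String) : split_by_reset l = chunks l := by
  cases l with
  | nil => rw [split_by_reset, splitA]; simp [chunks_nil]
  | cons x xs =>
    by_cases hx : x = "reset"
    · rw [split_by_reset, splitA, if_pos hx, if_pos (by simp)]
      rw [splitA_eq xs [] [x] (by simp)]
      subst hx
      simp [chunks_cons]
    · rw [split_by_reset, splitA, if_neg hx]
      rw [splitA_eq xs [] ([] ++ [x]) (by simp)]
      simp [chunks_cons]

theorem take_takeWhile_length {α : Type} (p : α → Bool) (xs : List α) :
    xs.take (xs.takeWhile p).length = xs.takeWhile p := by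
  induction xs with
  | nil => simp
  | cons x xs ih =>
    by_cases hx : p x
    · simp [hx, ih]
    · simp [hx]

theorem dropWhile_eq_drop {α : Type} (p : α → Bool) (xs : List α) :
    xs.dropWhile p = xs.drop (xs.takeWhile p).length := by
  induction xs with
  | nil => simp
  | cons x xs ih =>
    by_cases hx : p x
    · simp [hx, ih]
    · simp [hx]

theorem bFind_eq (l : List String) (n : Nat) (hn : n = l.length) :
    ∀ (m j : Nat), n - j ≤ m →
      bFind l n j = j + ((l.drop j).takeWhile (fun s => s ≠ "reset")).length := by
  intro m
  induction m with
  | zero =>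
    intro j hm
    have hjn : n ≤ j := by omega
    rw [bFind, dif_neg (by omega)]
    rw [List.drop_eq_nil_of_le (by omega)]
    simp
  | succ m ih =>
    intro j hm
    rw [bFind]
    by_cases h : j < n ∧ l.getD j "" ≠ "reset"
    · rw [dif_pos h]
      obtain ⟨hj, hne⟩ := h
      have hj' : j < l.length := hn ▸ hj
      rw [ih (j + 1) (by omega)]
      rw [List.drop_eq_getElem_cons hj']
      have hg : l.getD j "" = l[j] := by
        simp [List.getD, List.getElem?_eq_getElem hj']
      rw [hg] at hne
      rw [List.takeWhile_cons, if_pos (by simpa using hne)]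
      simp; omega
    · rw [dif_neg h]
      by_cases hj : j < n
      · push Not at h
        have hne' := h hj
        have hj' : j < l.length := hn ▸ hj
        rw [List.drop_eq_getElem_cons hj']
        have hg : l.getD j "" = l[j] := by
          simp [List.getD, List.getElem?_eq_getElem hj']
        rw [hg] at hne'
        rw [List.takeWhile_cons, if_neg (by simpa using hne')]
        simp
      · rw [List.drop_eq_nil_of_le (by omega)]
        simp

theorem bOuter_eq (l : List String) (n : Nat) (hn : n = l.length) :
    ∀ (m i : Nat), n - i ≤ m → bOuter l n i = chunks (l.drop i) := by
  intro m
  induction m with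
  | zero =>
    intro i hm
    rw [bOuter, dif_neg (by omega)]
    rw [List.drop_eq_nil_of_le (by omega), chunks_nil]
  | succ m ih =>
    intro i hm
    rw [bOuter]
    by_cases h : i < n
    · rw [dif_pos h]
      have hi : i < l.length := hn ▸ h
      set p : String → Bool := fun s => s ≠ "reset" with hp
      have hbf : bFind l n (i + 1) = (i + 1) + ((l.drop (i + 1)).takeWhile p).length :=
        bFind_eq l n hn (n - (i + 1)) (i + 1) le_rfl
      set k := ((l.drop (i + 1)).takeWhile p).length with hk
      have hkle : k ≤ l.length - (i + 1) := by
        have h1 : ((l.drop (i + 1)).takeWhile p).length ≤ (l.drop (i + 1)).length :=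
          (List.takeWhile_sublist _).length_le
        simpa [hk] using h1
      have hslice : PySem.List.slice l (some (i : Int)) (some ((bFind l n (i + 1) : Nat) : Int))
          = l[i] :: (l.drop (i + 1)).takeWhile p := by
        rw [PySem.List.slice_natCast, hbf]
        have h2 : (i + 1) + k - i = k + 1 := by omega
        rw [h2, List.drop_eq_getElem_cons hi, List.take_succ_cons, hk,
          take_takeWhile_length]
      rw [hslice, ih (bFind l n (i + 1)) (by rw [hbf]; omega), hbf]
      rw [List.drop_eq_getElem_cons hi, chunks_cons]
      congr 1
      rw [dropWhile_eq_drop, ← hk, List.drop_drop]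
    · rw [dif_neg h]
      rw [List.drop_eq_nil_of_le (by omega), chunks_nil]

-- ===== VERDICT (by name: the statement is the Claim_ definition above) =====
theorem split_by_reset_spec : Claim_equal_split_by_reset := by
  intro l _
  unfold Spec_split_by_reset split_by_reset_alt
  rw [bOuter_eq l l.length rfl l.length 0 (by omega), List.drop_zero, split_eq_chunks]
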